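-- pv_equiv track=rewrite | github.com/wook101/algorithm | 백준/해시/숫자카드2.py | solution
-- ===== SOURCE A (Python) =====
-- from collections import defaultdict
--
-- def solution(cards,targets):
--     result = []
--     data = defaultdict(int)
--     for card in cards:
--         data[card]+=1
--     for target in targets:
--         result.append(data[target])
--
--     return ' '.join(map(str,result))
-- ===== SOURCE B (Python) =====
-- def solution(cards, targets):
--     s = sorted(cards)
--     n = len(s)
--
--     def bound(ok):
--         # first index i with not ok(s[i]) (n if ok holds everywhere),
--         # assuming ok holds on a prefix of the sorted list s
--         lo, hi = 0, n
--         while lo < hi: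
--             mid = (lo + hi) // 2
--             if ok(s[mid]):
--                 lo = mid + 1
--             else:
--                 hi = mid
--         return lo
--
--     result = []
--     for target in targets:
--         result.append(bound(lambda v: v <= target) - bound(lambda v: v < target))
--
--     return ' '.join(map(str, result))
-- ===== Notes on version B (the rewrite author's own statement) =====
-- stated objective: alternative
-- what changed: B replaces the frequency dictionary with a sorted copy of the cards and answers each target by a hand-written binary search: (first index with s[i] > t) minus (first index with s[i] >= t), i.e. bisect_right - bisect_left bound differences.
import Mathlib
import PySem

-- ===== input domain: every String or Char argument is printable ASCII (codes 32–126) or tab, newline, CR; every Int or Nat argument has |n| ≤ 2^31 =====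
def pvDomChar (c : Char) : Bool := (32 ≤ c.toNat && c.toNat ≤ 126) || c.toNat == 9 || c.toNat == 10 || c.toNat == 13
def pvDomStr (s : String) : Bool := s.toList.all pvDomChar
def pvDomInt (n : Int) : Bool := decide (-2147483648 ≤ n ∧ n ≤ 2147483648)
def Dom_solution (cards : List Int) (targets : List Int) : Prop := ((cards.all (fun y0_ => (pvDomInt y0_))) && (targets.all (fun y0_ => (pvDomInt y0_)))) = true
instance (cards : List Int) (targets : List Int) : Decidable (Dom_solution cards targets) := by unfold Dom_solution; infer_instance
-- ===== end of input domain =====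

-- B replaces A's frequency dictionary with a sorted copy of cards and a hand-written binary
-- search per target (bisect_right − bisect_left as bound differences); alternative, not faster.

-- ===== PORT A =====
-- defaultdict lookup data[target] also inserts a default 0 for a missing key; that mutation cannot
-- change any value read afterwards (getD still returns the count), so the port reads with getD.
def solution (cards : List Int) (targets : List Int) : String :=
  let data : PySem.Dict Int Int := cards.foldl (fun d card => d.modify card 0 (· + 1)) PySem.Dict.empty
  let result : List Int := targets.foldl (fun r target => r ++ [data.getD target 0]) []
  PySem.Str.join " " (result.map PySem.Int.toStr)

-- ===== PORT B =====
-- hand-written binary search of Source B (`while lo < hi: …`), ported as recursion on hi - lo;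
-- s[mid] is always in range in Source B, so getD's default is never read.
def pvBound (s : List Int) (ok : Int → Bool) (lo hi : Nat) : Nat :=
  if lo < hi then
    let mid := (lo + hi) / 2
    if ok (s.getD mid 0) then pvBound s ok (mid + 1) hi else pvBound s ok lo mid
  else lo
termination_by hi - lo
decreasing_by all_goals omega

def solution_alt (cards : List Int) (targets : List Int) : String :=
  let s := PySem.List.sorted cards (fun x => x) false
  let n := s.length
  let result : List Int := targets.foldl
    (fun r target =>
      r ++ [((pvBound s (fun v => v ≤ target) 0 n : Int) - (pvBound s (fun v => v < target) 0 n : Int))]) []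
  PySem.Str.join " " (result.map PySem.Int.toStr)

-- ===== PRECONDITION & SPEC =====
def Spec_solution (cards : List Int) (targets : List Int) (out : String) : Prop := out = solution_alt cards targets
instance (cards : List Int) (targets : List Int) (out : String) : Decidable (Spec_solution cards targets out) := by unfold Spec_solution; infer_instance

-- ===== CLAIM (what is proved, stated in full; the proofs are below) =====
def Claim_equal_solution : Prop := ∀ (cards : List Int) (targets : List Int), Dom_solution cards targets → Spec_solution cards targets (solution cards targets)

-- ===== LEMMAS AND PROOFS =====

-- the binary search returns the length of the prefix on which ok holds, provided ok holds
-- exactly on a prefix of s and the boundary lies between lo and hi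
theorem pvBound_inv (s : List Int) (ok : Int → Bool) (r : Nat) (_hr : r ≤ s.length)
    (hch : ∀ i (_ : i < s.length), ok s[i] = true ↔ i < r) :
    ∀ lo hi, lo ≤ r → r ≤ hi → hi ≤ s.length → pvBound s ok lo hi = r := by
  suffices H : ∀ n lo hi, hi - lo ≤ n → lo ≤ r → r ≤ hi → hi ≤ s.length → pvBound s ok lo hi = r by
    exact fun lo hi => H (hi - lo) lo hi le_rfl
  intro n
  induction n with
  | zero =>
    intro lo hi h0 h1 h2 h3
    rw [pvBound]
    have : ¬ lo < hi := by omega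
    simp only [this, if_false]
    omega
  | succ n ih =>
    intro lo hi h0 h1 h2 h3
    rw [pvBound]
    by_cases hlt : lo < hi
    · simp only [hlt, if_true]
      have hmid : (lo + hi) / 2 < s.length := by omega
      rw [List.getD_eq_getElem s 0 hmid]
      by_cases hok : ok s[(lo + hi) / 2] = true
      · simp only [hok, if_true]
        have hr' : (lo + hi) / 2 < r := (hch _ hmid).mp hok
        exact ih ((lo + hi) / 2 + 1) hi (by omega) (by omega) h2 h3
      · simp only [hok, Bool.false_eq_true, if_false]
        have hr' : ¬ (lo + hi) / 2 < r := fun hc => hok ((hch _ hmid).mpr hc)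
        exact ih lo ((lo + hi) / 2) (by omega) h1 (by omega) (by omega)
    · simp only [hlt, if_false]
      omega

theorem countP_le_split (l : List Int) (t : Int) :
    l.countP (fun v => decide (v ≤ t)) = l.countP (fun v => decide (v < t)) + l.count t := by
  induction l with
  | nil => simp
  | cons a tl ih =>
    simp only [List.countP_cons, List.count_cons, ih]
    rcases lt_trichotomy a t with h | h | h
    · simp [h, le_of_lt h, h.ne]
      omega
    · simp [h]
      omega
    · simp [not_le_of_gt h, not_lt_of_gt h, h.ne']

-- on a sorted list, a downward-closed predicate holds exactly on a prefix, of length countP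
theorem prefix_char (s : List Int) (hp : s.Pairwise (· ≤ ·)) (ok : Int → Bool)
    (hmono : ∀ a b : Int, a ≤ b → ok b = true → ok a = true) :
    ∀ i (hi : i < s.length), ok s[i] = true ↔ i < s.countP ok := by
  induction s with
  | nil => intro i hi; simp at hi
  | cons a tl ih =>
    rcases List.pairwise_cons.mp hp with ⟨ha, htl⟩
    by_cases h0 : ok a = true
    · intro i hi
      rw [List.countP_cons]
      simp only [h0, if_true]
      rcases i with _ | j
      · simp [h0]
      · have hj : j < tl.length := by simpa using hi
        have := ih htl j hj
        simpa [Nat.succ_lt_succ_iff] using this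
    · have hz : (a :: tl).countP ok = 0 := by
        rw [List.countP_eq_zero]
        intro x hx
        rcases List.mem_cons.mp hx with rfl | hx'
        · simpa using h0
        · exact fun hc => h0 (hmono a x (ha x hx') hc)
      intro i hi
      rw [hz]
      simp only [Nat.not_lt_zero, iff_false]
      intro hc
      apply h0
      rcases i with _ | j
      · simpa using hc
      · have hj : j < tl.length := by simpa using hi
        exact hmono a _ (ha _ (List.getElem_mem hj)) (by simpa using hc)

-- per-target value of B equals the multiplicity of the target in cards
theorem bound_diff_eq_count (cards : List Int) (t : Int) :
    ((pvBound (PySem.List.sorted cards (fun x => x) false) (fun v => v ≤ t) 0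
        (PySem.List.sorted cards (fun x => x) false).length : Int)
      - (pvBound (PySem.List.sorted cards (fun x => x) false) (fun v => v < t) 0
        (PySem.List.sorted cards (fun x => x) false).length : Int))
      = (cards.count t : Int) := by
  have hp : (PySem.List.sorted cards (fun x => x) false).Pairwise (· ≤ ·) := by
    simpa using PySem.List.sorted_pairwise (xs := cards) (key := fun x => x)
  have hperm : (PySem.List.sorted cards (fun x => x) false).Perm cards :=
    PySem.List.sorted_perm cards (fun x => x) false
  have h2 := prefix_char _ hp (fun v => decide (v ≤ t))
    (fun a b hab hb => by simp at hb ⊢; omega)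
  have h1 := prefix_char _ hp (fun v => decide (v < t))
    (fun a b hab hb => by simp at hb ⊢; omega)
  rw [pvBound_inv _ _ _ List.countP_le_length h2 0 _ (Nat.zero_le _)
        List.countP_le_length le_rfl,
      pvBound_inv _ _ _ List.countP_le_length h1 0 _ (Nat.zero_le _)
        List.countP_le_length le_rfl,
      hperm.countP_eq, hperm.countP_eq, countP_le_split cards t]
  push_cast
  omega

-- ===== VERDICT (by name: the statement is the Claim_ definition above) =====
theorem solution_spec : Claim_equal_solution := by
  intro cards targets _
  unfold Spec_solution solution solution_alt
  simp only [PySem.List.foldl_append_singleton_eq_map,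
    PySem.Dict.getD_foldl_modify_add_one, PySem.Dict.getD_empty]
  simp only [List.nil_append, List.map_map]
  congr 1
  refine List.map_congr_left ?_
  intro t _
  simp only [Function.comp_apply]
  rw [bound_diff_eq_count]
  congr 1
  omega
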